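-- pv_equiv track=rewrite | github.com/Feng-12138/LooSchedule | data/scraper/courses/getCourseFromUWflow.py | produceCourseStrList
-- ===== SOURCE A (Python) =====
-- def produceCourseStrList(courseStr: str):
--     oneOfcourseList = []
--     firstCourseList = []
--     if courseStr != "":
--         firstCourseList = courseStr.split(";")
--         for item in firstCourseList:
--             item = item.replace("1:", "")
--             item = item.replace("2:", "")
--             item = item.replace("3:", "")
--             curList = item.split(",")
--             for item2 in curList:
--                 if len(item2) > 1:
--                     oneOfcourseList.append(item2)
--     return oneOfcourseList
-- ===== SOURCE B (Python) =====
-- def _pass(s, d):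
--     # one-char-lookbehind automaton: drop each non-overlapping marker occurrence left to right
--     out = []
--     prev = None
--     for c in s:
--         if c == ":" and prev == d:
--             prev = None
--         else:
--             if prev is not None:
--                 out.append(prev)
--             prev = c
--     if prev is not None:
--         out.append(prev)
--     return "".join(out)
--
--
-- def produceCourseStrList(courseStr: str):
--     s = _pass(_pass(_pass(courseStr, "1"), "2"), "3")
--     result = []
--     cur = []
--     for c in s:
--         if c == ";" or c == ",":
--             if len(cur) > 1:
--                 result.append("".join(cur))
--             cur = []
--         else:
--             cur.append(c)
--     if len(cur) > 1:
--         result.append("".join(cur))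
--     return result
-- ===== Notes on version B (the rewrite author's own statement) =====
-- stated objective: alternative
-- what changed: Replaces A's nested split/replace/split list-building passes with character-level state machines: three one-char-lookbehind automaton passes that delete the two-character group markers, then a single scan with a token accumulator that emits a token at each delimiter when the buffer is longer than one character; no split or replace is used.
import Mathlib
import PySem

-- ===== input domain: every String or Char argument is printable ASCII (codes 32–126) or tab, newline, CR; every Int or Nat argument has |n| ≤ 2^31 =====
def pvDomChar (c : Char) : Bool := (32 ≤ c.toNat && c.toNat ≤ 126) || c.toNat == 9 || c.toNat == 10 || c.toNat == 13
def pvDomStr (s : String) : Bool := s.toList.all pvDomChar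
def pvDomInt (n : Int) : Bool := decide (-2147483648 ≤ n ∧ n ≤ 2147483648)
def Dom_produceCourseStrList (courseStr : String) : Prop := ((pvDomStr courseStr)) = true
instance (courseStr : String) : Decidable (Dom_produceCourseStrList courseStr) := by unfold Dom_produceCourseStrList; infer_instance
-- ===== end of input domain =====

-- B replaces A's nested split/replace/split passes by character-level state machines (three
-- one-char-lookbehind automaton passes deleting the two-character group markers, then one
-- tokenizing scan with an accumulator); same return value (objective: alternative).

-- ===== PORT A =====
-- s.split(sep) with nonempty sep is PySem.Chars.splitOn on the code points (Str.split? never 'none' here)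
def produceCourseStrList (courseStr : String) : List String :=
  let oneOfcourseList : List String := []
  if courseStr ≠ "" then
    let firstCourseList := List.map String.ofList (PySem.Chars.splitOn courseStr.toList [';'])
    firstCourseList.foldl (fun oneOfcourseList item =>
      let item := PySem.Str.replace item "1:" ""
      let item := PySem.Str.replace item "2:" ""
      let item := PySem.Str.replace item "3:" ""
      let curList := List.map String.ofList (PySem.Chars.splitOn item.toList [','])
      curList.foldl (fun oneOfcourseList item2 =>
        if 1 < PySem.Str.len item2 then oneOfcourseList ++ [item2] else oneOfcourseList)
        oneOfcourseList) oneOfcourseList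
  else oneOfcourseList

-- ===== PORT B =====
-- _pass's loop body: one-char-lookbehind automaton step ('prev' is the buffered char)
def pvPassStep (d : Char) (st : List Char × Option Char) (c : Char) : List Char × Option Char :=
  if c = ':' ∧ st.2 = some d then (st.1, none)
  else ((match st.2 with | some p => st.1 ++ [p] | none => st.1), some c)

-- _pass's trailing 'if prev is not None: out.append(prev)' plus the join
def pvPassFlush (r : List Char × Option Char) : List Char :=
  match r.2 with | some p => r.1 ++ [p] | none => r.1

def passB (s : String) (d : Char) : String :=
  String.ofList (pvPassFlush (s.toList.foldl (pvPassStep d) ([], none)))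

-- tokenizing loop body of produceCourseStrList (emit the buffer at a delimiter)
def pvTokStep (st : List String × List Char) (c : Char) : List String × List Char :=
  if c = ';' ∨ c = ',' then
    ((if 1 < st.2.length then st.1 ++ [String.ofList st.2] else st.1), ([] : List Char))
  else (st.1, st.2 ++ [c])

def pvTokFlush (r : List String × List Char) : List String :=
  if 1 < r.2.length then r.1 ++ [String.ofList r.2] else r.1

def produceCourseStrList_alt (courseStr : String) : List String :=
  pvTokFlush ((passB (passB (passB courseStr '1') '2') '3').toList.foldl pvTokStep ([], []))

-- ===== PRECONDITION & SPEC =====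
def Spec_produceCourseStrList (courseStr : String) (out : List String) : Prop := out = produceCourseStrList_alt courseStr
instance (courseStr : String) (out : List String) : Decidable (Spec_produceCourseStrList courseStr out) := by unfold Spec_produceCourseStrList; infer_instance

-- ===== CLAIM (what is proved, stated in full; the proofs are below) =====
def Claim_equal_produceCourseStrList : Prop := ∀ (courseStr : String), Dom_produceCourseStrList courseStr → Spec_produceCourseStrList courseStr (produceCourseStrList courseStr)

-- ===== LEMMAS AND PROOFS =====

-- proof-side structural characterizations of Python's str.split (single-char sep) and str.replace
def splitC (c : Char) : List Char → List (List Char)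
  | [] => [[]]
  | a :: t => if a = c then [] :: splitC c t else (splitC c t).modifyHead (a :: ·)

def myRepl (old new : List Char) : List Char → List Char
  | [] => []
  | c :: t =>
    if old.isPrefixOf (c :: t) then new ++ myRepl old new (t.drop (old.length - 1))
    else c :: myRepl old new t
termination_by s => s.length
decreasing_by
  · simp only [List.length_cons]; simp only [List.length_drop]; omega
  · simp

-- split on either delimiter (';' or ','), the shape B's tokenizer realizes
def split2 : List Char → List (List Char)
  | [] => [[]]
  | a :: t => if a = ';' ∨ a = ',' then [] :: split2 t else (split2 t).modifyHead (a :: ·)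

theorem replace_go_spec (old new : List Char) (hold : old ≠ []) :
    ∀ (fuel : Nat) (l acc : List Char), l.length ≤ fuel →
      PySem.Chars.replace.go old new fuel l acc = acc.reverse ++ myRepl old new l := by
  intro fuel
  induction fuel using Nat.strong_induction_on with
  | _ fuel ih =>
    intro l acc hl
    match fuel, l with
    | 0, l =>
      have : l = [] := by cases l <;> simp_all
      subst this
      simp [PySem.Chars.replace.go, myRepl]
    | f+1, [] =>
      simp [PySem.Chars.replace.go, myRepl]
    | f+1, c :: t =>
      rw [PySem.Chars.replace.go]
      rw [myRepl]
      by_cases hpre : old.isPrefixOf (c :: t)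
      · simp only [hpre, if_true]
        obtain ⟨o, os, rfl⟩ : ∃ o os, old = o :: os := by
          cases old with | nil => exact absurd rfl hold | cons o os => exact ⟨o, os, rfl⟩
        have hdrop : List.drop (o :: os).length (c :: t) = t.drop ((o :: os).length - 1) := by
          simp [List.length_cons]
        rw [hdrop, ih f (by omega) _ _ (by simp only [List.length_drop]; simp at hl; omega)]
        simp
      · simp only [hpre]
        rw [ih f (by omega) t (c :: acc) (by simp at hl; omega)]
        simp

theorem splitOn_go_spec (c : Char) :
    ∀ (fuel : Nat) (l cur : List Char) (acc : List (List Char)), l.length ≤ fuel →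
      PySem.Chars.splitOn.go [c] fuel l cur acc
        = acc.reverse ++ (splitC c l).modifyHead (cur.reverse ++ ·) := by
  intro fuel
  induction fuel using Nat.strong_induction_on with
  | _ fuel ih =>
    intro l cur acc hl
    match fuel, l with
    | 0, l =>
      have : l = [] := by cases l <;> simp_all
      subst this
      simp [PySem.Chars.splitOn.go, splitC]
    | f+1, [] =>
      simp [PySem.Chars.splitOn.go, splitC]
    | f+1, a :: t =>
      rw [PySem.Chars.splitOn.go, splitC]
      by_cases hac : a = c
      · subst hac
        have hpre : List.isPrefixOf [a] (a :: t) = true := by simp [List.isPrefixOf]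
        simp only [hpre, if_true]
        rw [ih f (by omega) _ _ _ (by simp at hl; simp; omega)]
        simp
        cases splitC a t <;> simp
      · have hpre : List.isPrefixOf [c] (a :: t) = false := by
          simp [List.isPrefixOf]; exact fun h => hac h.symm
        simp only [hpre, Bool.false_eq_true, if_false, if_neg hac]
        rw [ih f (by omega) t (a :: cur) acc (by simp at hl; omega)]
        congr 1
        cases h : splitC c t with
        | nil => simp
        | cons p ps => simp

theorem replace_eq_myRepl (l old new : List Char) (hold : old ≠ []) :
    PySem.Chars.replace l old new = myRepl old new l := by
  rw [PySem.Chars.replace]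
  have : old.isEmpty = false := by cases old <;> simp_all
  rw [this]
  simp only [Bool.false_eq_true, if_false]
  rw [replace_go_spec old new hold l.length l [] (le_refl _)]
  simp

theorem splitOn_eq_splitC (l : List Char) (c : Char) :
    PySem.Chars.splitOn l [c] = splitC c l := by
  rw [PySem.Chars.splitOn, splitOn_go_spec c (l.length+1) l [] [] (by omega)]
  cases splitC c l <;> simp

theorem splitC_ne_nil (c : Char) : ∀ (l : List Char), splitC c l ≠ [] := by
  intro l
  induction l with
  | nil => simp [splitC]
  | cons a t ih =>
    rw [splitC]
    split_ifs
    · simp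
    · cases h : splitC c t with
      | nil => exact absurd h ih
      | cons p ps => simp

theorem split2_ne_nil : ∀ (l : List Char), split2 l ≠ [] := by
  intro l
  induction l with
  | nil => simp [split2]
  | cons a t ih =>
    rw [split2]
    split_ifs
    · simp
    · cases h : split2 t with
      | nil => exact absurd h ih
      | cons p ps => simp

theorem mem_myRepl {a : Char} (old new : List Char) : ∀ (l : List Char), a ∈ myRepl old new l →
    a ∈ l ∨ a ∈ new := by
  intro l
  induction hn : l.length using Nat.strong_induction_on generalizing l with
  | _ n ih =>
  subst hn
  match l with
  | [] => intro h; simp [myRepl] at h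
  | c :: t =>
    by_cases hpre : old.isPrefixOf (c :: t)
    · rw [myRepl, if_pos hpre]
      intro h
      rcases List.mem_append.mp h with h | h
      · exact Or.inr h
      · rcases ih _ (by simp only [List.length_cons, List.length_drop]; omega) _ rfl h with h | h
        · exact Or.inl (List.mem_cons_of_mem _ (List.mem_of_mem_drop h))
        · exact Or.inr h
    · rw [myRepl, if_neg hpre]
      intro h
      rcases List.mem_cons.mp h with h | h
      · exact Or.inl (h ▸ List.mem_cons_self)
      · rcases ih _ (by simp) _ rfl h with h | h
        · exact Or.inl (List.mem_cons_of_mem _ h)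
        · exact Or.inr h

theorem splitC_of_not_mem {c : Char} : ∀ {l : List Char}, c ∉ l → splitC c l = [l] := by
  intro l
  induction l with
  | nil => intro _; rfl
  | cons a t ih =>
    intro h
    rw [splitC, if_neg (by simp at h; exact fun e => h.1 e.symm), ih (by simp at h; exact h.2)]
    rfl

theorem splitC_append {c : Char} : ∀ {x : List Char} (y : List Char), c ∉ x →
    splitC c (x ++ c :: y) = x :: splitC c y := by
  intro x
  induction x with
  | nil => intro y _; rw [List.nil_append, splitC, if_pos rfl]
  | cons a t ih =>
    intro y h
    simp only [List.cons_append]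
    rw [splitC, if_neg (by simp at h; exact fun e => h.1 e.symm), ih y (by simp at h; exact h.2)]
    rfl

theorem first_occ {c : Char} : ∀ {l : List Char}, c ∈ l →
    ∃ x y, l = x ++ c :: y ∧ c ∉ x := by
  intro l
  induction l with
  | nil => intro h; simp at h
  | cons a t ih =>
    intro h
    by_cases hac : a = c
    · exact ⟨[], t, by simp [hac], by simp⟩
    · rcases ih (by rcases List.mem_cons.mp h with h | h; exact absurd h.symm hac; exact h) with ⟨x, y, rfl, hx⟩
      exact ⟨a :: x, y, rfl, by simp [hx]; exact fun h' => hac h'.symm⟩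

-- a pattern avoiding c is a prefix of x ++ c :: y iff it is a prefix of x
theorem prefix_append_sep {old x y : List Char} {c : Char} (hc : c ∉ old) :
    old <+: (x ++ c :: y) ↔ old <+: x := by
  constructor
  · intro h
    by_cases hlen : old.length ≤ x.length
    · have htake : old = (x ++ c :: y).take old.length := (List.prefix_iff_eq_take).mp h
      rw [List.take_append_of_le_length hlen] at htake
      exact htake ▸ List.take_prefix _ _
    · exfalso
      apply hc
      have htake : old = (x ++ c :: y).take old.length := (List.prefix_iff_eq_take).mp h
      have hx : x.length < old.length := by omega
      have hmem : c ∈ old := by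
        rw [htake]
        have hidx : x.length < ((x ++ c :: y).take old.length).length := by
          simp [List.length_take, List.length_append]; omega
        have heq : ((x ++ c :: y).take old.length)[x.length]'hidx = c := by
          rw [List.getElem_take]
          rw [List.getElem_append_right (le_refl _)]
          simp
        have hmem2 := List.getElem_mem hidx
        rw [heq] at hmem2
        exact hmem2
      exact hmem
  · intro h
    exact h.trans (List.prefix_append _ _)

theorem myRepl_append_sep (old new : List Char) (c : Char)
    (hc : c ∉ old) (hold : old ≠ []) :
    ∀ (x y : List Char), myRepl old new (x ++ c :: y) = myRepl old new x ++ c :: myRepl old new y := by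
  intro x
  induction hn : x.length using Nat.strong_induction_on generalizing x with
  | _ n ih =>
  subst hn
  intro y
  match x with
  | [] =>
    have hnp : ¬ old.isPrefixOf (c :: y) = true := by
      intro hpre
      have : old <+: [] := (prefix_append_sep (x := []) hc).mp (List.isPrefixOf_iff_prefix.mp hpre)
      exact hold (List.prefix_nil.mp this)
    rw [List.nil_append]
    conv_lhs => rw [myRepl]
    rw [if_neg hnp]
    rw [show myRepl old new [] = [] from by rw [myRepl]]
    rfl
  | a :: t =>
    have hiff : old.isPrefixOf (a :: t ++ c :: y) = old.isPrefixOf (a :: t) := by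
      by_cases hp : old <+: (a :: t)
      · rw [List.isPrefixOf_iff_prefix.mpr hp,
          List.isPrefixOf_iff_prefix.mpr ((prefix_append_sep (x := a :: t) hc).mpr hp)]
      · have h1 : old.isPrefixOf (a :: t) = false := by
          rw [Bool.eq_false_iff]; intro h; exact hp (List.isPrefixOf_iff_prefix.mp h)
        have h2 : old.isPrefixOf (a :: t ++ c :: y) = false := by
          rw [Bool.eq_false_iff]; intro h
          exact hp ((prefix_append_sep (x := a :: t) hc).mp (List.isPrefixOf_iff_prefix.mp h))
        rw [h1, h2]
    rw [List.cons_append, myRepl, myRepl]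
    rw [show (a :: (t ++ c :: y)) = (a :: t ++ c :: y) by simp, hiff]
    by_cases hp : old.isPrefixOf (a :: t)
    · rw [if_pos hp, if_pos hp]
      have hlen : old.length ≤ t.length + 1 := by
        have := (List.isPrefixOf_iff_prefix.mp hp).length_le; simpa using this
      have hdrop : (t ++ c :: y).drop (old.length - 1) = t.drop (old.length - 1) ++ c :: y := by
        rw [List.drop_append_of_le_length (by omega)]
      rw [hdrop, ih ((t.drop (old.length - 1)).length)
        (by have h1 : 0 < old.length := List.length_pos_iff.mpr hold
            simp only [List.length_drop, List.length_cons]; omega)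
        _ rfl]
      simp
    · rw [if_neg hp, if_neg hp]
      rw [ih t.length (by simp) t rfl]
      simp

theorem splitC_myRepl (c : Char) (old new : List Char) (hold : old ≠ [])
    (hco : c ∉ old) (hcn : c ∉ new) :
    ∀ l, splitC c (myRepl old new l) = (splitC c l).map (myRepl old new) := by
  intro l
  induction hn : l.length using Nat.strong_induction_on generalizing l with
  | _ n ih =>
  subst hn
  by_cases hcl : c ∈ l
  · rcases first_occ hcl with ⟨x, y, rfl, hx⟩
    rw [myRepl_append_sep old new c hco hold x y]
    have hcx : c ∉ myRepl old new x := by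
      intro h; rcases mem_myRepl old new x h with h | h
      · exact hx h
      · exact hcn h
    rw [splitC_append _ hcx, splitC_append _ hx, List.map_cons]
    rw [ih y.length (by simp [List.length_append]; omega) y rfl]
  · have hcl' : c ∉ myRepl old new l := by
      intro h; rcases mem_myRepl old new l h with h | h
      · exact hcl h
      · exact hcn h
    rw [splitC_of_not_mem hcl', splitC_of_not_mem hcl, List.map_singleton]

def rmC (p : List Char) : List Char :=
  myRepl ['3', ':'] [] (myRepl ['2', ':'] [] (myRepl ['1', ':'] [] p))

theorem repl_chain (s : String) :
    (PySem.Str.replace (PySem.Str.replace (PySem.Str.replace s "1:" "") "2:" "") "3:" "").toList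
      = rmC s.toList := by
  simp only [PySem.Str.toList_replace, rmC]
  rw [replace_eq_myRepl _ _ _ (by decide), replace_eq_myRepl _ _ _ (by decide),
      replace_eq_myRepl _ _ _ (by decide)]
  rfl

theorem len_ofList (q : List Char) : PySem.Str.len (String.ofList q) = (q.length : Int) := by
  simp [PySem.Str.len]

theorem inner_foldl (l : List (List Char)) : ∀ (x : List String),
    l.foldl (fun acc q =>
        if 1 < PySem.Str.len (String.ofList q) then acc ++ [String.ofList q] else acc) x
      = x ++ (l.filter (fun q => decide ((1 : Int) < (q.length : Int)))).map String.ofList := by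
  induction l with
  | nil => intro x; simp
  | cons q t ih =>
    intro x
    rw [List.foldl_cons, ih]
    by_cases h : (1 : Int) < (q.length : Int)
    · have hn : 1 < q.length := by exact_mod_cast h
      rw [if_pos (by rw [len_ofList]; exact h)]
      simp [hn]
    · have hn : ¬ 1 < q.length := by exact_mod_cast h
      rw [if_neg (by rw [len_ofList]; exact h)]
      simp [hn]

-- the list a buffered char contributes when prepended to the rest of the input
def optL : Option Char → List Char
  | some p => [p]
  | none => []

theorem myRepl_nil (old new : List Char) : myRepl old new [] = [] := by
  rw [myRepl]

theorem myRepl_pat_single (d : Char) (new : List Char) (p : Char) :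
    myRepl [d, ':'] new [p] = [p] := by
  rw [myRepl, if_neg (by simp [List.isPrefixOf]), myRepl_nil]

theorem myRepl_pat_pos (d : Char) (new t : List Char) :
    myRepl [d, ':'] new (d :: ':' :: t) = new ++ myRepl [d, ':'] new t := by
  rw [myRepl, if_pos (by simp [List.isPrefixOf])]
  rfl

theorem myRepl_pat_neg (d : Char) (new : List Char) (p c : Char) (t : List Char)
    (h : ¬ (p = d ∧ c = ':')) :
    myRepl [d, ':'] new (p :: c :: t) = p :: myRepl [d, ':'] new (c :: t) := by
  rw [myRepl, if_neg (by
    simp only [List.isPrefixOf, Bool.and_eq_true, beq_iff_eq]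
    intro hx
    rcases hx with ⟨h1, h2, -⟩
    exact h ⟨h1.symm, h2.symm⟩)]

-- automaton invariant: flushing the fold from state (out, prev) yields out ++ replace of prev::rest
theorem pass_fold (d : Char) : ∀ (l out : List Char) (prev : Option Char),
    pvPassFlush (l.foldl (pvPassStep d) (out, prev))
      = out ++ myRepl [d, ':'] [] (optL prev ++ l) := by
  intro l
  induction l with
  | nil =>
    intro out prev
    cases prev with
    | none => simp [pvPassFlush, optL, myRepl_nil]
    | some p =>
      simp only [List.foldl_nil, pvPassFlush, optL, List.append_nil]
      rw [myRepl_pat_single]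
  | cons c t ih =>
    intro out prev
    rw [List.foldl_cons]
    by_cases h : c = ':' ∧ prev = some d
    · obtain ⟨rfl, rfl⟩ := h
      rw [show pvPassStep d (out, some d) ':' = (out, none) from by
        simp [pvPassStep]]
      rw [ih out none]
      simp only [optL, List.nil_append, List.cons_append]
      rw [myRepl_pat_pos]
      rfl
    · cases prev with
      | none =>
        rw [show pvPassStep d (out, none) c = (out, some c) from by
          simp [pvPassStep]]
        rw [ih out (some c)]
        simp [optL]
      | some p =>
        have hcond : ¬ (c = ':' ∧ (some p : Option Char) = some d) := h
        rw [show pvPassStep d (out, some p) c = (out ++ [p], some c) from by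
          simp only [pvPassStep, if_neg hcond]]
        rw [ih (out ++ [p]) (some c)]
        simp only [optL, List.cons_append, List.nil_append, List.append_assoc]
        congr 1
        rw [myRepl_pat_neg d [] p c t (by
          intro ⟨h1, h2⟩
          exact h ⟨h2, by rw [h1]⟩)]

theorem passB_toList (s : String) (d : Char) :
    (passB s d).toList = myRepl [d, ':'] [] s.toList := by
  unfold passB
  rw [String.toList_ofList, pass_fold d s.toList [] none]
  simp [optL]

-- tokenizer invariant
theorem tok_fold : ∀ (l : List Char) (out : List String) (cur : List Char),
    pvTokFlush (l.foldl pvTokStep (out, cur))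
      = out ++ (((split2 l).modifyHead (cur ++ ·)).filter
          (fun q => decide (1 < q.length))).map String.ofList := by
  intro l
  induction l with
  | nil =>
    intro out cur
    simp only [List.foldl_nil, pvTokFlush, split2, List.modifyHead_cons, List.append_nil]
    by_cases h : 1 < cur.length
    · simp [h]
    · simp [h]
  | cons c t ih =>
    intro out cur
    rw [List.foldl_cons]
    by_cases h : c = ';' ∨ c = ','
    · rw [show pvTokStep (out, cur) c
          = ((if 1 < cur.length then out ++ [String.ofList cur] else out), []) from by
        simp only [pvTokStep, if_pos h]]
      rw [ih]
      rw [show split2 (c :: t) = [] :: split2 t from by rw [split2, if_pos h]]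
      have hid : (split2 t).modifyHead (fun x => [] ++ x) = split2 t := by
        cases split2 t <;> simp
      rw [hid]
      simp only [List.modifyHead_cons, List.append_nil, List.filter_cons]
      by_cases hc : 1 < cur.length
      · simp [hc]
      · simp [hc]
    · rw [show pvTokStep (out, cur) c = (out, cur ++ [c]) from by
        simp only [pvTokStep, if_neg h]]
      rw [ih]
      rw [show split2 (c :: t) = (split2 t).modifyHead (c :: ·) from by rw [split2, if_neg h]]
      obtain ⟨q, qs, hqs⟩ : ∃ q qs, split2 t = q :: qs := by
        cases h : split2 t with
        | nil => exact absurd h (split2_ne_nil t)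
        | cons q qs => exact ⟨q, qs, rfl⟩
      rw [hqs]
      simp [List.append_assoc]

theorem split2_eq : ∀ (l : List Char), split2 l = (splitC ';' l).flatMap (splitC ',') := by
  intro l
  induction l with
  | nil => simp [split2, splitC]
  | cons a t ih =>
    by_cases ha : a = ';'
    · subst ha
      rw [show split2 (';' :: t) = [] :: split2 t from by rw [split2, if_pos (Or.inl rfl)]]
      rw [show splitC ';' (';' :: t) = [] :: splitC ';' t from by rw [splitC, if_pos rfl]]
      rw [List.flatMap_cons, ih]
      simp [splitC]
    · obtain ⟨p, ps, hps⟩ : ∃ p ps, splitC ';' t = p :: ps := by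
        cases h : splitC ';' t with
        | nil => exact absurd h (splitC_ne_nil ';' t)
        | cons p ps => exact ⟨p, ps, rfl⟩
      rw [show splitC ';' (a :: t) = (splitC ';' t).modifyHead (a :: ·) from by
        rw [splitC, if_neg ha]]
      rw [hps, List.modifyHead_cons, List.flatMap_cons]
      by_cases hb : a = ','
      · subst hb
        rw [show split2 (',' :: t) = [] :: split2 t from by rw [split2, if_pos (Or.inr rfl)]]
        rw [show splitC ',' (',' :: p) = [] :: splitC ',' p from by rw [splitC, if_pos rfl]]
        rw [ih, hps, List.flatMap_cons]
        simp
      · rw [show split2 (a :: t) = (split2 t).modifyHead (a :: ·) from by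
          rw [split2, if_neg (by simp [ha, hb])]]
        rw [show splitC ',' (a :: p) = (splitC ',' p).modifyHead (a :: ·) from by
          rw [splitC, if_neg hb]]
        rw [ih, hps, List.flatMap_cons]
        obtain ⟨q, qs, hqs⟩ : ∃ q qs, splitC ',' p = q :: qs := by
          cases h : splitC ',' p with
          | nil => exact absurd h (splitC_ne_nil ',' p)
          | cons q qs => exact ⟨q, qs, rfl⟩
        rw [hqs]
        simp

theorem rmC_splitSemi (l : List Char) :
    splitC ';' (rmC l) = (splitC ';' l).map rmC := by
  unfold rmC
  rw [splitC_myRepl ';' ['3', ':'] [] (by decide) (by decide) (by decide),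
      splitC_myRepl ';' ['2', ':'] [] (by decide) (by decide) (by decide),
      splitC_myRepl ';' ['1', ':'] [] (by decide) (by decide) (by decide),
      List.map_map, List.map_map]
  rfl

theorem passes_toList (s : String) :
    (passB (passB (passB s '1') '2') '3').toList = rmC s.toList := by
  rw [passB_toList, passB_toList, passB_toList]
  rfl

theorem alt_eq_flatMap (s : String) :
    produceCourseStrList_alt s
      = (splitC ';' s.toList).flatMap (fun q =>
          ((splitC ',' (rmC q)).filter (fun q => decide ((1 : Int) < (q.length : Int)))).map
            String.ofList) := by
  unfold produceCourseStrList_alt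
  rw [passes_toList, tok_fold]
  have hid : (split2 (rmC s.toList)).modifyHead (fun x => [] ++ x) = split2 (rmC s.toList) := by
    cases split2 (rmC s.toList) <;> simp
  rw [hid, split2_eq, rmC_splitSemi, List.flatMap_map, List.filter_flatMap, List.map_flatMap]
  simp only [List.nil_append]
  congr 1
  funext q
  congr 1
  apply List.filter_congr
  intro x _
  simp

-- ===== VERDICT (by name: the statement is the Claim_ definition above) =====
theorem produceCourseStrList_spec : Claim_equal_produceCourseStrList := by
  intro courseStr _
  unfold Spec_produceCourseStrList
  by_cases hs : courseStr = ""
  · subst hs; decide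
  · rw [alt_eq_flatMap]
    unfold produceCourseStrList
    rw [if_pos hs]
    simp only [List.foldl_map, repl_chain, String.toList_ofList, splitOn_eq_splitC, inner_foldl]
    rw [PySem.List.foldl_append_eq_flatMap]
    rfl
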